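-- pv_equiv track=rewrite | github.com/theislab/ehrapy | ehrapy/api/encode/encode.py | _get_categoricals_old_indices
-- ===== SOURCE A (Python) =====
-- from typing import Dict, List, Optional, Set, Tuple, Union
--
-- def _get_categoricals_old_indices(old_var_names: List[str], encoded_categories: List[str]) -> Set[int]:
--     """Get indices of every (possibly encoded) categorical column belonging to a newly encoded categorical value
--
--     Args:
--         old_var_names: Former variables names
--         encoded_categories: Already encoded categories
--
--     Returns:
--         Set of all indices of formerly encoded categories belonging to a newly encoded categorical value
--     """
--     idx_list = set()
--     category_set = set(encoded_categories)
--     for idx, old_var_name in enumerate(old_var_names):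
--         # if the old variable was previously unencoded (only the case for numerical categoricals)
--         if old_var_name in category_set:
--             idx_list.add(idx)
--         # if the old variable was already encoded
--         elif old_var_name.startswith("ehrapycat_"):
--             if any(old_var_name[10:].startswith(category) for category in category_set):
--                 idx_list.add(idx)
--
--     return idx_list
-- ===== SOURCE B (Python) =====
-- def _get_categoricals_old_indices(old_var_names, encoded_categories):
--     """Same result as A, but tests the variable's own prefixes
--     against a hash set instead of scanning every category."""
--     cats = set(encoded_categories)
--     maxlen = max((len(c) for c in encoded_categories), default=-1)
--     idx_list = set()
--     for idx, name in enumerate(old_var_names):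
--         if name in cats:
--             idx_list.add(idx)
--         elif name.startswith("ehrapycat_"):
--             suffix = name[10:]
--             upper = min(len(suffix), maxlen)
--             if any(suffix[:k] in cats for k in range(upper + 1)):
--                 idx_list.add(idx)
--     return idx_list
-- ===== Notes on version B (the rewrite author's own statement) =====
-- stated objective: alternative
-- what changed: Instead of scanning every encoded category per variable to test it as a prefix, B precomputes the maximum category length and checks each prefix of the variable's suffix for membership in a hash set, removing the inner scan over categories (a win only when many categories exist; it trades the inner category scan for prefix-membership lookups).
import Mathlib
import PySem

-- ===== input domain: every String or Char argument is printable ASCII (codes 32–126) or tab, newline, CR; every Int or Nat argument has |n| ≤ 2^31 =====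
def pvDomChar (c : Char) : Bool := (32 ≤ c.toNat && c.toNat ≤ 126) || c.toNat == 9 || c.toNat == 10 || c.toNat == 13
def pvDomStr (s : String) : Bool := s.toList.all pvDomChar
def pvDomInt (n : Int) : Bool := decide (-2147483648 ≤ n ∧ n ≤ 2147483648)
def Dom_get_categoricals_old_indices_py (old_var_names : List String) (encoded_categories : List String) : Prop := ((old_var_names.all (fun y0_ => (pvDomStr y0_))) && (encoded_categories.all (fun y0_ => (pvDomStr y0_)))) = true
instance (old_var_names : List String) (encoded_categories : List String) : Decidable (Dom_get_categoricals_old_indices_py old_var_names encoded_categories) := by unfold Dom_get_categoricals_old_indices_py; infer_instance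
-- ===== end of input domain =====

-- B replaces A's inner scan over all categories by membership tests of the
-- variable's own prefixes in the category set (an alternative algorithm);
-- return values are identical on all inputs.

-- ===== PORT A =====
def get_categoricals_old_indices_py (old_var_names : List String) (encoded_categories : List String) : List Int :=
  let category_set : PySem.Set String := PySem.Set.ofList encoded_categories
  (PySem.List.enumerate old_var_names 0).foldl
    (fun (idx_list : PySem.Set Int) (p : Int × String) =>
      if PySem.Set.contains category_set p.2 then PySem.Set.add idx_list p.1
      else if PySem.Str.startswith p.2 "ehrapycat_" then
        (if category_set.any (fun category =>
            PySem.Str.startswith (PySem.Str.slice p.2 (some 10) none) category) then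
          PySem.Set.add idx_list p.1
        else idx_list)
      else idx_list)
    PySem.Set.empty

-- ===== PORT B =====
def get_categoricals_old_indices_py_alt (old_var_names : List String) (encoded_categories : List String) : List Int :=
  let cats : PySem.Set String := PySem.Set.ofList encoded_categories
  -- max((len(c) for c in encoded_categories), default=-1)
  let maxlen : Int := encoded_categories.foldl (fun m c => max m (PySem.Str.len c : Int)) (-1)
  (PySem.List.enumerate old_var_names 0).foldl
    (fun (idx_list : PySem.Set Int) (p : Int × String) =>
      if PySem.Set.contains cats p.2 then PySem.Set.add idx_list p.1
      else if PySem.Str.startswith p.2 "ehrapycat_" then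
        let suffix := PySem.Str.slice p.2 (some 10) none
        let upper : Int := min (PySem.Str.len suffix : Int) maxlen
        (if (PySem.List.pyRange 0 (upper + 1) 1).any (fun k =>
            PySem.Set.contains cats (PySem.Str.slice suffix none (some k))) then
          PySem.Set.add idx_list p.1
        else idx_list)
      else idx_list)
    PySem.Set.empty

-- ===== PRECONDITION & SPEC =====
def Spec_get_categoricals_old_indices_py (old_var_names : List String) (encoded_categories : List String) (out : List Int) : Prop := out = get_categoricals_old_indices_py_alt old_var_names encoded_categories
instance (old_var_names : List String) (encoded_categories : List String) (out : List Int) : Decidable (Spec_get_categoricals_old_indices_py old_var_names encoded_categories out) := by unfold Spec_get_categoricals_old_indices_py; infer_instance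

-- ===== CLAIM (what is proved, stated in full; the proofs are below) =====
def Claim_equal_get_categoricals_old_indices_py : Prop := ∀ (old_var_names : List String) (encoded_categories : List String), Dom_get_categoricals_old_indices_py old_var_names encoded_categories → Spec_get_categoricals_old_indices_py old_var_names encoded_categories (get_categoricals_old_indices_py old_var_names encoded_categories)

-- ===== LEMMAS AND PROOFS =====

-- the starting value is below the running maximum of the fold
theorem le_foldl_max (l : List String) (m : Int) :
    m ≤ l.foldl (fun m c => max m (PySem.Str.len c : Int)) m := by
  induction l generalizing m with
  | nil => simp
  | cons c l ih =>
    simp only [List.foldl_cons]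
    exact le_trans (le_max_left _ _) (ih _)

-- every member's length is below the fold's result
theorem len_le_foldl_max (l : List String) (m : Int) (c : String) (hc : c ∈ l) :
    (PySem.Str.len c : Int) ≤ l.foldl (fun m c => max m (PySem.Str.len c : Int)) m := by
  induction l generalizing m with
  | nil => cases hc
  | cons d l ih =>
    simp only [List.foldl_cons]
    rcases List.mem_cons.mp hc with h | h
    · subst h; exact le_trans (le_max_right _ _) (le_foldl_max _ _)
    · exact ih _ h

-- the key pointwise fact: A's "some category is a prefix of s" equals
-- B's "some prefix of s (up to min(len s, maxlen)) is in the set"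
theorem any_prefix_eq (ec : List String) (s : String) :
    (PySem.Set.ofList ec).any (fun category => PySem.Str.startswith s category)
      = (PySem.List.pyRange 0
          (min (PySem.Str.len s : Int)
            (ec.foldl (fun m c => max m (PySem.Str.len c : Int)) (-1)) + 1) 1).any
          (fun k => PySem.Set.contains (PySem.Set.ofList ec) (PySem.Str.slice s none (some k))) := by
  rw [Bool.eq_iff_iff]
  simp only [List.any_eq_true]
  constructor
  · rintro ⟨c, hc, hpre⟩
    have hcmem : c ∈ ec := (PySem.Set.mem_ofList _ _).mp hc
    have hpre' : c.toList <+: s.toList := by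
      simpa [PySem.Chars.startswith_iff] using hpre
    have hlen : c.toList.length ≤ s.toList.length := hpre'.length_le
    have hmaxlen : (PySem.Str.len c : Int)
        ≤ ec.foldl (fun m c => max m (PySem.Str.len c : Int)) (-1) :=
      len_le_foldl_max ec (-1) c hcmem
    refine ⟨(c.toList.length : Int), ?_, ?_⟩
    · rw [PySem.List.mem_pyRange_one]
      simp only [PySem.Str.len_eq] at hmaxlen ⊢
      omega
    · rw [PySem.Set.contains_iff, PySem.Set.mem_ofList]
      have heq : PySem.Str.slice s none (some (c.toList.length : Int)) = c := by
        apply String.toList_inj.mp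
        have h0 : (0 : Int) ≤ (c.toList.length : Int) := by positivity
        simp only [PySem.Str.toList_slice, PySem.Chars.slice_eq_listSlice,
          PySem.List.slice_to _ h0, Int.toNat_natCast]
        exact (List.prefix_iff_eq_take.mp hpre').symm
      rw [heq]; exact hcmem
  · rintro ⟨k, hk, hmem⟩
    rw [PySem.List.mem_pyRange_one] at hk
    have h0 : (0 : Int) ≤ k := hk.1
    refine ⟨PySem.Str.slice s none (some k), ?_, ?_⟩
    · exact (PySem.Set.mem_ofList _ _).mpr ((PySem.Set.mem_ofList _ _).mp
        ((PySem.Set.contains_iff _ _).mp hmem))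
    · simp [PySem.Chars.startswith_iff, PySem.List.slice_to _ h0, List.take_prefix]

theorem folds_eq (old_var_names : List String) (encoded_categories : List String) :
    get_categoricals_old_indices_py old_var_names encoded_categories
      = get_categoricals_old_indices_py_alt old_var_names encoded_categories := by
  unfold get_categoricals_old_indices_py get_categoricals_old_indices_py_alt
  simp only [any_prefix_eq]

-- ===== VERDICT (by name: the statement is the Claim_ definition above) =====
theorem get_categoricals_old_indices_py_spec : Claim_equal_get_categoricals_old_indices_py := by
  intro o e _
  exact folds_eq o e
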